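-- pv_equiv track=rewrite | github.com/BibleNLP/greek-room | greekroom/greekroom/gr_utilities/wb_file_props.py | key_with_exclusive_highest_count
-- ===== SOURCE A (Python) =====
-- def key_with_exclusive_highest_count(d: dict) -> str | None:
--     highest_count = 0
--     result = None
--     for k in d.keys():
--         count = d.get(k, 0)
--         if count > highest_count:
--             result = k
--             highest_count = count
--         elif count == highest_count:
--             result = None
--     return result
-- ===== SOURCE B (Python) =====
-- def key_with_exclusive_highest_count(d: dict) -> str | None:
--     if not d:
--         return None
--     m = max(d.values())
--     if m <= 0:
--         return None
--     winners = [k for k, v in d.items() if v == m]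
--     return winners[0] if len(winners) == 1 else None
-- ===== Notes on version B (the rewrite author's own statement) =====
-- stated objective: idiomatic
-- what changed: Replaces the running single-pass scan with running highest_count/result state by a find-max-then-collect-winners decomposition: compute the maximum value, return None unless it is positive, then return the key iff exactly one key attains it.
import Mathlib
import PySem

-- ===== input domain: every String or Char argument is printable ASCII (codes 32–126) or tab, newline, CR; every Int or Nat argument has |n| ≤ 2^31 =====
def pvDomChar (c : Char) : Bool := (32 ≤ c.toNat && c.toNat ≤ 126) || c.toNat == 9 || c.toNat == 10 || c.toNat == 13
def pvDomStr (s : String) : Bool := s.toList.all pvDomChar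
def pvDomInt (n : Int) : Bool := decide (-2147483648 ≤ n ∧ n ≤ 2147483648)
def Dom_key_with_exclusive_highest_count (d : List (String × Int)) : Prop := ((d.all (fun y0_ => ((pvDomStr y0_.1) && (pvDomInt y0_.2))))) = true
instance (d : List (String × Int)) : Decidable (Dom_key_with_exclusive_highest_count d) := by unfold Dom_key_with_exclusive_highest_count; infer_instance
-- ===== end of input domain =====

-- B replaces A's running single-pass scan by an idiomatic find-max-then-collect-winners decomposition (same O(n) cost).


-- ===== PORT A =====
-- for k in d.keys(): count = d.get(k, 0); … — over a dict each key is paired with its value,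
-- so the loop visits each (k, count) pair in insertion order.
def key_with_exclusive_highest_count (d : List (String × Int)) : Option String :=
  (d.foldl (fun (st : Int × Option String) kv =>
      if kv.2 > st.1 then (kv.2, some kv.1)
      else if kv.2 == st.1 then (st.1, none)
      else st)
    ((0 : Int), (none : Option String))).2

-- ===== PORT B =====
def key_with_exclusive_highest_count_alt (d : List (String × Int)) : Option String :=
  match PySem.List.max? (d.map Prod.snd) (fun v => v) with
  | none => none                       -- 'if not d: return None'
  | some m =>
    if m ≤ 0 then none
    else
      match (d.filter (fun kv => kv.2 == m)).map Prod.fst with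
      | [w] => some w
      | _ => none

-- ===== PRECONDITION & SPEC =====
def Spec_key_with_exclusive_highest_count (d : List (String × Int)) (out : Option String) : Prop := out = key_with_exclusive_highest_count_alt d
instance (d : List (String × Int)) (out : Option String) : Decidable (Spec_key_with_exclusive_highest_count d out) := by unfold Spec_key_with_exclusive_highest_count; infer_instance

-- ===== CLAIM (what is proved, stated in full; the proofs are below) =====
def Claim_equal_key_with_exclusive_highest_count : Prop := ∀ (d : List (String × Int)), Dom_key_with_exclusive_highest_count d → Spec_key_with_exclusive_highest_count d (key_with_exclusive_highest_count d)

-- ===== LEMMAS AND PROOFS =====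

-- running maximum (with A's 0 baseline) and the multiset of max-attaining keys
def pvM (d : List (String × Int)) : Int := d.foldl (fun a kv => max a kv.2) 0
def pvWinners (d : List (String × Int)) (m : Int) : List String :=
  (d.filter (fun kv => kv.2 == m)).map Prod.fst
def pvR (d : List (String × Int)) : Option String :=
  if 0 < pvM d then
    match pvWinners d (pvM d) with
    | [w] => some w
    | _ => none
  else none

theorem pvM_append (d : List (String × Int)) (x : String × Int) :
    pvM (d ++ [x]) = max (pvM d) x.2 := by
  simp [pvM, List.foldl_append]

theorem pvWinners_append (d : List (String × Int)) (x : String × Int) (m : Int) :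
    pvWinners (d ++ [x]) m = pvWinners d m ++ (if x.2 = m then [x.1] else []) := by
  simp [pvWinners, List.filter_append]
  split_ifs with h <;> simp [h]

theorem pv_le_M (d : List (String × Int)) : 0 ≤ pvM d ∧ ∀ kv ∈ d, kv.2 ≤ pvM d := by
  induction d using List.reverseRecOn with
  | nil => simp [pvM]
  | append_singleton d x ih =>
    rw [pvM_append]
    refine ⟨le_max_of_le_left ih.1, ?_⟩
    intro kv hkv
    rcases List.mem_append.1 hkv with h | h
    · exact le_max_of_le_left (ih.2 kv h)
    · simp at h; subst h; exact le_max_right _ _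

theorem pvWinners_big (d : List (String × Int)) (m : Int) (h : pvM d < m) :
    pvWinners d m = [] := by
  simp [pvWinners, List.filter_eq_nil_iff]
  intro a b hab
  exact fun he => absurd (he ▸ (pv_le_M d).2 (a, b) hab) (not_le.2 h)

theorem pvWinners_ne_nil (d : List (String × Int)) (h : 0 < pvM d) :
    pvWinners d (pvM d) ≠ [] := by
  induction d using List.reverseRecOn with
  | nil => simp [pvM] at h
  | append_singleton d x ih =>
    rw [pvM_append] at h ⊢
    rw [pvWinners_append]
    by_cases hle : pvM d ≤ x.2
    · rw [max_eq_right hle]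
      simp
    · have hlt : x.2 < pvM d := by omega
      rw [max_eq_left hlt.le]
      rw [max_eq_left hlt.le] at h
      have := ih h
      simp [ne_eq, if_neg (by omega : ¬ x.2 = pvM d)]
      exact this

-- invariant of A's loop: the state after the scan is (running max with 0 baseline, pvR)
theorem pvFoldA_spec (d : List (String × Int)) :
    d.foldl (fun (st : Int × Option String) kv =>
      if kv.2 > st.1 then (kv.2, some kv.1)
      else if kv.2 == st.1 then (st.1, none)
      else st) ((0 : Int), (none : Option String)) = (pvM d, pvR d) := by
  induction d using List.reverseRecOn with
  | nil => simp [pvM, pvR]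
  | append_singleton d x ih =>
    rw [List.foldl_append, ih]
    simp only [List.foldl_cons, List.foldl_nil]
    have hM' := pvM_append d x
    rcases lt_trichotomy (pvM d) x.2 with hlt | heq | hgt
    · rw [if_pos (by exact_mod_cast hlt)]
      have h0 : 0 < x.2 := lt_of_le_of_lt (pv_le_M d).1 hlt
      have hMx : pvM (d ++ [x]) = x.2 := by rw [hM']; exact max_eq_right hlt.le
      have hR : pvR (d ++ [x]) = some x.1 := by
        unfold pvR
        rw [hMx, if_pos h0, pvWinners_append, pvWinners_big d x.2 hlt, if_pos rfl]
        simp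
      rw [hMx, hR]
    · rw [if_neg (by omega), if_pos (by simp [heq])]
      have hMx : pvM (d ++ [x]) = pvM d := by rw [hM', ← heq, max_self]
      have hR : pvR (d ++ [x]) = none := by
        unfold pvR
        rw [hMx]
        rcases eq_or_lt_of_le (pv_le_M d).1 with h0 | h0
        · rw [if_neg (by omega)]
        · rw [if_pos h0, pvWinners_append, ← heq, if_pos rfl]
          rcases hw : pvWinners d (pvM d) with _ | ⟨w, t⟩
          · exact absurd hw (pvWinners_ne_nil d h0)
          · cases t <;> simp
      rw [hMx, hR]
    · rw [if_neg (by omega), if_neg (by simp; omega)]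
      have hMx : pvM (d ++ [x]) = pvM d := by rw [hM']; exact max_eq_left hgt.le
      have hR : pvR (d ++ [x]) = pvR d := by
        unfold pvR
        rw [hMx, pvWinners_append, if_neg (show ¬ x.2 = pvM d by omega), List.append_nil]
      rw [hMx, hR]

theorem pv_foldl_max_shift (l : List Int) (a b : Int) :
    l.foldl max (max a b) = max a (l.foldl max b) := by
  induction l generalizing b with
  | nil => simp
  | cons c t ih => simp [List.foldl_cons, max_assoc, ih]

-- ===== VERDICT (by name: the statement is the Claim_ definition above) =====
theorem key_with_exclusive_highest_count_spec : Claim_equal_key_with_exclusive_highest_count := by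
  intro d _
  unfold Spec_key_with_exclusive_highest_count
  rw [key_with_exclusive_highest_count, pvFoldA_spec]
  cases d with
  | nil => simp [pvR, pvM, key_with_exclusive_highest_count_alt, PySem.List.max?]
  | cons kv t =>
    have hmax : PySem.List.max? ((kv :: t).map Prod.snd) (fun v => v)
        = some ((t.map Prod.snd).foldl max kv.2) := by
      rw [List.map_cons]
      exact PySem.List.max?_id_cons _ _
    have hM : pvM (kv :: t) = max 0 ((t.map Prod.snd).foldl max kv.2) := by
      have : pvM (kv :: t) = (t.map Prod.snd).foldl max (max 0 kv.2) := by
        simp [pvM, List.foldl_map]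
      rw [this, pv_foldl_max_shift]
    set m := (t.map Prod.snd).foldl max kv.2 with hm
    rw [key_with_exclusive_highest_count_alt, hmax]
    by_cases hle : m ≤ 0
    · simp only [if_pos hle]
      have : pvM (kv :: t) = 0 := by rw [hM]; omega
      simp [pvR, this]
    · simp only [if_neg hle]
      have h0 : 0 < m := by omega
      have hMm : pvM (kv :: t) = m := by rw [hM]; omega
      simp only [pvR, hMm, if_pos h0, pvWinners]
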